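-- pv_equiv track=rewrite | github.com/CaiJingLong/marscode_prompt | 022_字符串去重.py | solution
-- ===== SOURCE A (Python) =====
-- def solution(S):
--     # 统计每个字符的出现次数
--     char_count = {}
--     for c in S:
--         char_count[c] = char_count.get(c, 0) + 1
--
--     operations = 0
--
--     while True:
--         # 检查是否还有重复字符
--         max_count = max(char_count.values()) if char_count else 0
--         if max_count <= 1:
--             break
--
--         # 找到一个重复次数最多的字符
--         for char, count in char_count.items():
--             if count > 1:
--                 # 删除两个相同字符
--                 char_count[char] -= 2
--                 if char_count[char] == 0:
--                     del char_count[char]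
--
--                 # 添加一个未使用的字符
--                 for new_char in 'abcdefghijklmnopqrstuvwxyz':
--                     if new_char not in char_count:
--                         char_count[new_char] = 1
--                         break
--
--                 operations += 1
--                 break
--
--     return operations
-- ===== SOURCE B (Python) =====
-- def solution(S):
--     odd = set()
--     for c in S:
--         if c in odd:
--             odd.discard(c)
--         else:
--             odd.add(c)
--     return (len(S) - len(odd)) // 2
-- ===== Notes on version B (the rewrite author's own statement) =====
-- stated objective: faster
-- what changed: A simulates every dedup operation on a full character-count dict (rescanning the dict and the alphabet per operation); B makes one pass keeping only the set of characters seen an odd number of times and returns (len(S) - len(odd)) // 2, since the number of removable pairs is sum(count//2) = (len(S) - #odd_counts)/2.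
import Mathlib
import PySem

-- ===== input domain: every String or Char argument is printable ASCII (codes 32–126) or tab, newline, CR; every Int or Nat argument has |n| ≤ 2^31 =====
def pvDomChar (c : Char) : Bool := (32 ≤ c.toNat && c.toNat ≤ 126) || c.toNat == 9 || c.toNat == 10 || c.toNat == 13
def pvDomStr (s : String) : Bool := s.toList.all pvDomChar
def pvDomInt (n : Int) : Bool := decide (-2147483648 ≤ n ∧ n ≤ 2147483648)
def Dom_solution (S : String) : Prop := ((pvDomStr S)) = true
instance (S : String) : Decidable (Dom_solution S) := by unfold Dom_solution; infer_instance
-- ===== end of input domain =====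

-- B replaces A's operation-by-operation simulation on a count dict by a single parity-set
-- pass and the closed form (len(S) - #odd) // 2; measured faster on large inputs.


-- ===== PORT A =====
-- the while-loop of A; the fuel argument only makes the recursion structural (the proof
-- below shows it never reaches 0 with the fuel `solution` supplies)
def solutionLoop (fuel : Nat) (d : PySem.Dict Char Int) (ops : Int) : Int :=
  match fuel with
  | 0 => ops
  | fuel + 1 =>
    -- max_count = max(char_count.values()) if char_count else 0
    let maxc : Int := if d.size = 0 then 0 else (PySem.List.max? d.values (fun v => v)).getD 0
    if maxc ≤ 1 then ops
    else
      -- for char, count in char_count.items(): if count > 1: … break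
      match d.items.find? (fun p => decide (1 < p.2)) with
      | none => solutionLoop fuel d ops          -- unreachable: max_count > 1 guarantees a hit
      | some (ch, _) =>
        let d1 := d.insert ch (d.getD ch 0 - 2)
        let d2 := if d1.getD ch 0 = 0 then d1.erase ch else d1
        -- for new_char in 'abcdefghijklmnopqrstuvwxyz': if new_char not in char_count: … break
        let d3 := match ("abcdefghijklmnopqrstuvwxyz".toList).find? (fun c => !(d2.contains c)) with
                  | some c => d2.insert c 1
                  | none => d2
        solutionLoop fuel d3 (ops + 1)

def solution (S : String) : Int :=
  let cnt := S.toList.foldl (fun d c => d.insert c (d.getD c 0 + 1)) PySem.Dict.empty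
  solutionLoop (S.toList.length + 1) cnt 0

-- ===== PORT B =====
def solution_alt (S : String) : Int :=
  let odd := S.toList.foldl
    (fun s c => if PySem.Set.contains s c then PySem.Set.discard s c else PySem.Set.add s c)
    PySem.Set.empty
  PySem.Int.floordiv (PySem.Str.len S - PySem.Set.len odd) 2

-- ===== PRECONDITION & SPEC =====
def Spec_solution (S : String) (out : Int) : Prop := out = solution_alt S
instance (S : String) (out : Int) : Decidable (Spec_solution S out) := by unfold Spec_solution; infer_instance

-- ===== CLAIM (what is proved, stated in full; the proofs are below) =====
def Claim_equal_solution : Prop := ∀ (S : String), Dom_solution S → Spec_solution S (solution S)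

-- ===== LEMMAS AND PROOFS =====

lemma pvFoldlMax_isSome {α κ : Type} [LT κ] [DecidableLT κ] (key : α → κ) (l : List α) : ∀ (a : α),
    (List.foldl (fun acc x => match acc with | none => some x | some m => if key m < key x then some x else some m) (some a) l).isSome := by
  induction l with
  | nil => intro a; simp
  | cons y t ih => intro a; simp only [List.foldl_cons]; split <;> apply ih

lemma pvMax?_isSome {xs : List Int} (h : xs ≠ []) : (PySem.List.max? xs (fun v => v)).isSome := by
  obtain ⟨x, t, rfl⟩ := List.exists_cons_of_ne_nil h
  simpa [PySem.List.max?] using pvFoldlMax_isSome (fun v => v) t x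

lemma sum_count_eq_length (xs : List Char) : ∀ (l : List Char), l.Nodup → (∀ c ∈ xs, c ∈ l) →
    (l.map (fun k => ((xs.count k : Int)))).sum = (xs.length : Int) := by
  induction xs with
  | nil => intro l _ _; simp
  | cons x xs ih =>
    intro l hnd hcov
    have hx : x ∈ l := hcov x (List.mem_cons_self)
    have h1 : (l.map (fun k => (((x :: xs).count k : Int)))).sum
        = (l.map (fun k => ((xs.count k : Int)))).sum + (l.map (fun k => if (k == x : Bool) then (1:Int) else 0)).sum := by
      rw [← PySem.List.sum_map_add_int]
      apply congrArg
      apply List.map_congr_left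
      intro k _
      by_cases hk : k = x
      · simp [hk]
      · simp [hk, Ne.symm hk]
    rw [h1, ih l hnd (fun c hc => hcov c (List.mem_cons_of_mem _ hc)),
        PySem.List.sum_map_ite_one_zero]
    have h2 : List.countP (fun k => k == x) l = l.count x := rfl
    rw [h2, List.count_eq_one_of_mem hnd hx]
    simp [List.length_cons]

lemma toggle_fold (xs : List Char) : ∀ (s : List Char), s.Nodup →
    (xs.foldl (fun s c => if PySem.Set.contains s c then PySem.Set.discard s c else PySem.Set.add s c) s).Nodup ∧
    ∀ c, c ∈ xs.foldl (fun s c => if PySem.Set.contains s c then PySem.Set.discard s c else PySem.Set.add s c) s ↔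
      (xs.count c % 2 = 1 ↔ c ∉ s) := by
  induction xs with
  | nil =>
    intro s hs
    refine ⟨hs, fun c => ?_⟩
    simp only [List.foldl_nil, List.count_nil]
    by_cases hm : c ∈ s <;> simp [hm]
  | cons x xs ih =>
    intro s hs
    simp only [List.foldl_cons]
    by_cases hx : PySem.Set.contains s x = true
    · have hxs : x ∈ s := by simpa [PySem.Set.contains] using hx
      have hstep : (if PySem.Set.contains s x = true then PySem.Set.discard s x else PySem.Set.add s x)
          = List.filter (fun y => !y == x) s := by rw [if_pos hx]; rfl
      rw [hstep]
      have hnd' : (List.filter (fun y => !y == x) s).Nodup := hs.filter _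
      obtain ⟨h1, h2⟩ := ih _ hnd'
      refine ⟨h1, fun c => ?_⟩
      rw [h2 c]
      have hmem : (c ∈ List.filter (fun y => !y == x) s) = (c ∈ s ∧ ¬ c = x) := by
        simp [List.mem_filter]
      rw [hmem]
      by_cases hc : c = x
      · subst hc
        have hcnt : (c :: xs).count c = xs.count c + 1 := by simp
        rw [hcnt]
        simp [hxs]
        omega
      · have hcnt : (x :: xs).count c = xs.count c := by simp [Ne.symm hc]
        rw [hcnt]
        simp [hc]
    · have hxs : x ∉ s := by simpa [PySem.Set.contains] using hx
      have hcb : PySem.Set.contains s x = false := by simpa using hx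
      have hstep : (if PySem.Set.contains s x = true then PySem.Set.discard s x else PySem.Set.add s x)
          = s ++ [x] := by rw [if_neg hx]; simp [PySem.Set.add, hxs]
      rw [hstep]
      have hnd' : (s ++ [x]).Nodup := by
        simp only [List.nodup_append]
        refine ⟨hs, by simp, ?_⟩
        intro a ha b hb heq
        rw [List.mem_singleton] at hb
        subst hb; subst heq
        exact hxs ha
      obtain ⟨h1, h2⟩ := ih _ hnd'
      refine ⟨h1, fun c => ?_⟩
      rw [h2 c]
      have hmem : (c ∈ s ++ [x]) = (c ∈ s ∨ c = x) := by simp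
      rw [hmem]
      by_cases hc : c = x
      · subst hc
        have hcnt : (c :: xs).count c = xs.count c + 1 := by simp
        rw [hcnt]
        simp [hxs]
        omega
      · have hcnt : (x :: xs).count c = xs.count c := by simp [Ne.symm hc]
        rw [hcnt]
        simp [hc]

def pvHalves (l : List (Char × Int)) : Int := (l.map (fun p => p.2 / 2)).sum

lemma pvHalves_append (a b : List (Char × Int)) : pvHalves (a ++ b) = pvHalves a + pvHalves b := by
  simp [pvHalves]

lemma pvHalves_cons (p : Char × Int) (b : List (Char × Int)) : pvHalves (p :: b) = p.2 / 2 + pvHalves b := by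
  simp [pvHalves]

lemma pvMap_noKey_id (ch : Char) (w : Char × Int) :
    ∀ (l : List (Char × Int)), ch ∉ l.map Prod.fst →
      l.map (fun p => if p.1 == ch then w else p) = l := by
  intro l h
  calc l.map (fun p => if p.1 == ch then w else p)
      = l.map id := by
        apply List.map_congr_left
        intro p hp
        have hne : p.1 ≠ ch := fun e => h (e ▸ List.mem_map_of_mem hp)
        simp [hne]
    _ = l := List.map_id _

lemma pvFilter_noKey_id (ch : Char) : ∀ (l : List (Char × Int)), ch ∉ l.map Prod.fst →
    l.filter (fun p => !p.1 == ch) = l := by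
  intro l h
  apply List.filter_eq_self.mpr
  intro p hp
  have hne : p.1 ≠ ch := fun e => h (e ▸ List.mem_map_of_mem hp)
  simp [hne]

lemma solutionLoop_eq : ∀ (fuel : Nat) (d : PySem.Dict Char Int) (ops : Int),
    d.keys.Nodup → (∀ p ∈ d.items, 1 ≤ p.2) → d.values.sum < (fuel : Int) →
    solutionLoop fuel d ops = ops + pvHalves d.items := by
  intro fuel
  induction fuel with
  | zero =>
    intro d ops _ hv hf
    exfalso
    have h0 : (0:Int) ≤ d.values.sum := by
      apply List.sum_nonneg
      intro v hvv
      simp only [PySem.Dict.values] at hvv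
      obtain ⟨p, hp, rfl⟩ := List.mem_map.mp hvv
      exact le_trans (by norm_num) (hv p hp)
    simp at hf
    omega
  | succ n ih =>
    intro d ops hnd hv hf
    simp only [solutionLoop]
    by_cases hmax : (if d.size = 0 then (0:Int) else (PySem.List.max? d.values (fun v => v)).getD 0) ≤ 1
    · rw [if_pos hmax]
      have hz : pvHalves d.items = 0 := by
        by_cases hsz : d.size = 0
        · have : d.items = [] := by
            simp only [PySem.Dict.size] at hsz
            exact List.eq_nil_of_length_eq_zero hsz
          simp [pvHalves, this]
        · rw [if_neg hsz] at hmax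
          have hvne : d.values ≠ [] := by
            simp only [PySem.Dict.size] at hsz
            simp only [PySem.Dict.values]
            intro h
            exact hsz (by simpa using congrArg List.length h)
          obtain ⟨m, hm⟩ := Option.isSome_iff_exists.mp (pvMax?_isSome hvne)
          rw [hm] at hmax
          simp at hmax
          have hmx := PySem.List.max?_isMax hm
          apply List.sum_eq_zero
          intro x hx
          obtain ⟨p, hp, rfl⟩ := List.mem_map.mp hx
          have h1 : 1 ≤ p.2 := hv p hp
          have h2 : p.2 ≤ m := hmx p.2 (by
            simp only [PySem.Dict.values]
            exact List.mem_map_of_mem hp)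
          have : p.2 = 1 := by omega
          rw [this]
          decide
      omega
    · rw [if_neg hmax]
      -- there is a duplicated character: the inner for-loop finds one
      have hsz : ¬ d.size = 0 := by
        intro h; rw [if_pos h] at hmax; exact hmax (by norm_num)
      have hvne : d.values ≠ [] := by
        simp only [PySem.Dict.size] at hsz
        simp only [PySem.Dict.values]
        intro h
        exact hsz (by simpa using congrArg List.length h)
      rw [if_neg hsz] at hmax
      obtain ⟨m, hm⟩ := Option.isSome_iff_exists.mp (pvMax?_isSome hvne)
      rw [hm] at hmax
      simp at hmax
      have hmmem : m ∈ d.values := PySem.List.max?_mem hm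
      obtain ⟨pm, hpm, hpm2⟩ := List.mem_map.mp (by simpa only [PySem.Dict.values] using hmmem)
      cases hfind : d.items.find? (fun p => decide (1 < p.2)) with
      | none =>
        exfalso
        have := List.find?_eq_none.mp hfind pm hpm
        simp [hpm2] at this
        omega
      | some pr =>
        obtain ⟨ch, cnt⟩ := pr
        obtain ⟨hcnt', pre, suf, hitems, hpre⟩ := List.find?_eq_some_iff_append.mp hfind
        have hcnt : 1 < cnt := by simpa using hcnt'
        have hkeys : d.keys = pre.map Prod.fst ++ ch :: suf.map Prod.fst := by
          simp [PySem.Dict.keys, hitems]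
        have hknd : (pre.map Prod.fst ++ ch :: suf.map Prod.fst).Nodup := hkeys ▸ hnd
        have hchpre : ch ∉ pre.map Prod.fst := by
          intro hmem
          exact (List.disjoint_of_nodup_append hknd) hmem List.mem_cons_self
        have hchsuf : ch ∉ suf.map Prod.fst := by
          have h := (List.nodup_append.mp hknd).2.1
          exact (List.nodup_cons.mp h).1
        have hcontains : d.contains ch = true := by
          simp only [PySem.Dict.contains, hitems]
          simp
        have hmemitems : (ch, cnt) ∈ d.items := by rw [hitems]; simp
        have hgetD : d.getD ch 0 = cnt := PySem.Dict.getD_of_mem_items d hmemitems hnd 0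
        simp only [hgetD]
        have hd1 : (d.insert ch (cnt - 2)).items = pre ++ (ch, cnt - 2) :: suf := by
          rw [PySem.Dict.items_insert_of_contains d _ hcontains, hitems]
          simp only [List.map_append, List.map_cons, beq_self_eq_true, if_true]
          rw [pvMap_noKey_id ch _ pre hchpre, pvMap_noKey_id ch _ suf hchsuf]
        have hgd1 : (d.insert ch (cnt - 2)).getD ch 0 = cnt - 2 :=
          PySem.Dict.getD_insert_self d ch (cnt - 2) 0
        -- sums of values over the decomposition
        have hvals : d.values = pre.map Prod.snd ++ cnt :: suf.map Prod.snd := by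
          simp [PySem.Dict.values, hitems]
        have hsum : d.values.sum = (pre.map Prod.snd).sum + cnt + (suf.map Prod.snd).sum := by
          rw [hvals]; simp; ring
        have hhalves : pvHalves d.items = pvHalves pre + cnt / 2 + pvHalves suf := by
          rw [hitems, pvHalves_append, pvHalves_cons]; ring
        have hfr : (pre.map Prod.snd).sum + cnt + (suf.map Prod.snd).sum < (n:Int) + 1 := by
          rw [← hsum]; exact_mod_cast hf
        have hvpre : ∀ p ∈ pre, 1 ≤ p.2 := fun p hp => hv p (by rw [hitems]; exact List.mem_append_left _ hp)
        have hvsuf : ∀ p ∈ suf, 1 ≤ p.2 := fun p hp => hv p (by rw [hitems]; simp [hp])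
        by_cases hzero : cnt - 2 = 0
        · -- the character's count drops to 0 and it is deleted
          simp only [hgd1, if_pos hzero]
          have hd2 : ((d.insert ch (cnt - 2)).erase ch).items = pre ++ suf := by
            show ((d.insert ch (cnt - 2)).items.filter (fun p => !p.1 == ch)) = pre ++ suf
            rw [hd1]
            rw [List.filter_append, List.filter_cons]
            simp only [beq_self_eq_true, Bool.not_true, if_neg (by simp : ¬ (false = true))]
            rw [pvFilter_noKey_id ch pre hchpre, pvFilter_noKey_id ch suf hchsuf]
          have hk2 : ((d.insert ch (cnt - 2)).erase ch).keys = pre.map Prod.fst ++ suf.map Prod.fst := by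
            simp [PySem.Dict.keys, hd2]
          have hk2nd : (pre.map Prod.fst ++ suf.map Prod.fst).Nodup := by
            have hsub : List.Sublist (pre.map Prod.fst ++ suf.map Prod.fst) (pre.map Prod.fst ++ ch :: suf.map Prod.fst) :=
              List.Sublist.append_left (List.sublist_cons_self ch _) _
            exact hknd.sublist hsub
          cases halpha : List.find? (fun c => !((d.insert ch (cnt - 2)).erase ch).contains c) "abcdefghijklmnopqrstuvwxyz".toList with
          | some c =>
            have hnc : ((d.insert ch (cnt - 2)).erase ch).contains c = false := by
              have := List.find?_some halpha
              simpa using this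
            have hd3 : (((d.insert ch (cnt - 2)).erase ch).insert c 1).items = (pre ++ suf) ++ [(c, 1)] := by
              rw [PySem.Dict.items_insert_of_not_contains _ _ (by rw [hnc]) , hd2]
            have hcnk : c ∉ pre.map Prod.fst ++ suf.map Prod.fst := by
              intro hmem
              rw [← hk2] at hmem
              rw [PySem.Dict.contains_eq_decide_mem_keys] at hnc
              simp at hnc
              exact hnc hmem
            rw [ih _ (ops + 1) ?_ ?_ ?_]
            · rw [hd3, pvHalves_append, pvHalves_append, hhalves]
              have h1 : pvHalves [(c, (1:Int))] = 0 := by simp [pvHalves]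
              have h2 : cnt / 2 = 1 := by omega
              rw [h1, h2]; ring
            · show ((((d.insert ch (cnt - 2)).erase ch).insert c 1).items.map Prod.fst).Nodup
              rw [hd3]
              simp only [List.map_append]
              rw [List.nodup_append]
              refine ⟨by simpa using hk2nd, by simp, ?_⟩
              intro a ha b hb heq
              simp at hb
              subst hb; subst heq
              exact hcnk (by simpa using ha)
            · intro p hp
              rw [hd3] at hp
              simp only [List.mem_append] at hp
              rcases hp with (hp | hp) | hp
              · exact hvpre p hp
              · exact hvsuf p hp
              · simp at hp; subst hp; norm_num
            · show ((((d.insert ch (cnt - 2)).erase ch).insert c 1).items.map Prod.snd).sum < (n:Int)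
              rw [hd3]
              simp only [List.map_append, List.sum_append]
              simp only [List.map_cons, List.map_nil, List.sum_cons, List.sum_nil]
              omega
          | none =>
            rw [ih _ (ops + 1) ?_ ?_ ?_]
            · rw [hd2, pvHalves_append, hhalves]
              have h2 : cnt / 2 = 1 := by omega
              rw [h2]; ring
            · show ((((d.insert ch (cnt - 2)).erase ch)).items.map Prod.fst).Nodup
              rw [hd2]; simpa using hk2nd
            · intro p hp
              rw [hd2] at hp
              rcases List.mem_append.mp hp with hp | hp
              · exact hvpre p hp
              · exact hvsuf p hp
            · show ((((d.insert ch (cnt - 2)).erase ch)).items.map Prod.snd).sum < (n:Int)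
              rw [hd2]
              simp only [List.map_append, List.sum_append]
              omega
        · -- the character keeps a positive count
          simp only [hgd1, if_neg hzero]
          have hk2 : (d.insert ch (cnt - 2)).keys = pre.map Prod.fst ++ ch :: suf.map Prod.fst := by
            simp [PySem.Dict.keys, hd1]
          cases halpha : List.find? (fun c => !(d.insert ch (cnt - 2)).contains c) "abcdefghijklmnopqrstuvwxyz".toList with
          | some c =>
            have hnc : (d.insert ch (cnt - 2)).contains c = false := by
              have := List.find?_some halpha
              simpa using this
            have hd3 : ((d.insert ch (cnt - 2)).insert c 1).items = (pre ++ (ch, cnt - 2) :: suf) ++ [(c, 1)] := by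
              rw [PySem.Dict.items_insert_of_not_contains _ _ (by rw [hnc]), hd1]
            have hcnk : c ∉ pre.map Prod.fst ++ ch :: suf.map Prod.fst := by
              intro hmem
              rw [← hk2] at hmem
              rw [PySem.Dict.contains_eq_decide_mem_keys] at hnc
              simp at hnc
              exact hnc hmem
            rw [ih _ (ops + 1) ?_ ?_ ?_]
            · rw [hd3, pvHalves_append, pvHalves_append, pvHalves_cons, hhalves]
              have h1 : pvHalves [(c, (1:Int))] = 0 := by simp [pvHalves]
              have h2 : (cnt - 2) / 2 = cnt / 2 - 1 := by omega
              rw [h1]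
              show ops + 1 + (pvHalves pre + ((cnt - 2) / 2 + pvHalves suf) + 0) = ops + (pvHalves pre + cnt / 2 + pvHalves suf)
              rw [h2]; ring
            · show (((d.insert ch (cnt - 2)).insert c 1).items.map Prod.fst).Nodup
              rw [hd3]
              simp only [List.map_append]
              rw [List.nodup_append]
              refine ⟨by simpa using hknd, by simp, ?_⟩
              intro a ha b hb heq
              simp at hb
              subst hb; subst heq
              exact hcnk (by simpa using ha)
            · intro p hp
              rw [hd3] at hp
              simp only [List.mem_append, List.mem_cons] at hp
              rcases hp with (hp | (hp | hp)) | hp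
              · exact hvpre p hp
              · subst hp; simp; omega
              · exact hvsuf p hp
              · simp at hp; subst hp; norm_num
            · show (((d.insert ch (cnt - 2)).insert c 1).items.map Prod.snd).sum < (n:Int)
              rw [hd3]
              simp only [List.map_append, List.sum_append, List.map_cons, List.sum_cons, List.map_nil, List.sum_nil]
              omega
          | none =>
            rw [ih _ (ops + 1) ?_ ?_ ?_]
            · rw [hd1, pvHalves_append, pvHalves_cons, hhalves]
              have h2 : (cnt - 2) / 2 = cnt / 2 - 1 := by omega
              rw [h2]; ring
            · show (((d.insert ch (cnt - 2))).items.map Prod.fst).Nodup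
              rw [hd1]; simpa using hknd
            · intro p hp
              rw [hd1] at hp
              simp only [List.mem_append, List.mem_cons] at hp
              rcases hp with hp | (hp | hp)
              · exact hvpre p hp
              · subst hp; simp; omega
              · exact hvsuf p hp
            · show (((d.insert ch (cnt - 2))).items.map Prod.snd).sum < (n:Int)
              rw [hd1]
              simp only [List.map_append, List.sum_append, List.map_cons, List.sum_cons]
              omega

lemma solution_eq_alt (S : String) : solution S = solution_alt S := by
  set xs := S.toList with hxsdef
  -- A computes Σ_{k distinct} count k / 2
  have hcounter : xs.foldl (fun d c => d.insert c (d.getD c 0 + 1)) PySem.Dict.empty = PySem.Dict.counter xs :=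
    PySem.Dict.foldl_insert_getD_add_one_eq_counter xs
  have hitems := PySem.Dict.items_counter xs
  have hvals : (PySem.Dict.counter xs).values = (PySem.Set.ofList xs).map (fun k => ((xs.count k : Int))) := by
    show (PySem.Dict.counter xs).items.map Prod.snd = _
    rw [hitems, List.map_map]
    rfl
  have hsumlen : ((PySem.Set.ofList xs).map (fun k => ((xs.count k : Int)))).sum = (xs.length : Int) :=
    sum_count_eq_length xs _ (PySem.Set.nodup_ofList xs) (fun c hc => (PySem.Set.mem_ofList _ _).mpr hc)
  have hA : solution S = pvHalves (PySem.Dict.counter xs).items := by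
    show solutionLoop (xs.length + 1) (xs.foldl (fun d c => d.insert c (d.getD c 0 + 1)) PySem.Dict.empty) 0 = _
    rw [hcounter]
    rw [solutionLoop_eq (xs.length + 1) _ 0 (PySem.Dict.nodup_keys_counter xs) ?_ ?_]
    · ring
    · intro p hp
      rw [hitems] at hp
      obtain ⟨k, hk, rfl⟩ := List.mem_map.mp hp
      have : k ∈ xs := (PySem.Set.mem_ofList _ _).mp hk
      have hpos : 0 < xs.count k := List.count_pos_iff.mpr this
      show 1 ≤ ((xs.count k : Int))
      omega
    · rw [hvals, hsumlen]
      push_cast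
      omega
  have hH : pvHalves (PySem.Dict.counter xs).items
      = ((PySem.Set.ofList xs).map (fun k => ((xs.count k : Int)) / 2)).sum := by
    unfold pvHalves
    rw [hitems, List.map_map]
    rfl
  -- B's odd set has as many elements as there are odd counts
  obtain ⟨hRnd, hRmem⟩ := toggle_fold xs [] List.nodup_nil
  set R := xs.foldl (fun s c => if PySem.Set.contains s c then PySem.Set.discard s c else PySem.Set.add s c) [] with hRdef
  set F := (PySem.Set.ofList xs).filter (fun k => decide (xs.count k % 2 = 1)) with hFdef
  have hFnd : F.Nodup := (PySem.Set.nodup_ofList xs).filter _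
  have hRF : R.Perm F := by
    rw [List.perm_ext_iff_of_nodup hRnd hFnd]
    intro c
    rw [hRmem c]
    constructor
    · intro h
      have hodd : xs.count c % 2 = 1 := h.mpr (by simp)
      have hmem : c ∈ xs := by
        by_contra hn
        rw [List.count_eq_zero_of_not_mem hn] at hodd
        omega
      rw [hFdef]
      simp [List.mem_filter, hodd]
      exact hmem
    · intro h
      rw [hFdef] at h
      have := List.mem_filter.mp h
      simp at this
      simp [this.2]
  have hRlen : R.length = List.countP (fun k => decide (xs.count k % 2 = 1)) (PySem.Set.ofList xs) := by
    rw [hRF.length_eq, hFdef, List.countP_eq_length_filter]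
  -- the closed form
  have hsplit : (xs.length : Int)
      = 2 * ((PySem.Set.ofList xs).map (fun k => ((xs.count k : Int)) / 2)).sum
        + (List.countP (fun k => decide (xs.count k % 2 = 1)) (PySem.Set.ofList xs) : Int) := by
    rw [← hsumlen]
    have hpt : (PySem.Set.ofList xs).map (fun k => ((xs.count k : Int)))
        = (PySem.Set.ofList xs).map (fun k => 2 * ((xs.count k : Int) / 2)
            + (if (decide (xs.count k % 2 = 1)) = true then (1:Int) else 0)) := by
      apply List.map_congr_left
      intro k _
      split_ifs with h
      · simp at h
        omega
      · simp at h
        omega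
    rw [hpt, PySem.List.sum_map_add_int, List.sum_map_mul_left, PySem.List.sum_map_ite_one_zero]
  have hB : solution_alt S = PySem.Int.floordiv ((xs.length : Int) - (R.length : Int)) 2 := by
    show PySem.Int.floordiv (PySem.Str.len S - PySem.Set.len R) 2 = _
    have h1 : PySem.Str.len S = (xs.length : Int) := by
      simp only [PySem.Str.len, hxsdef]
    have h2 : PySem.Set.len R = (R.length : Int) := by
      rfl
    rw [h1, h2]
  rw [hA, hH, hB, hRlen, hsplit]
  rw [PySem.Int.floordiv_eq_ediv_of_pos (by norm_num : (0:Int) < 2)]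
  have : (2 : Int) * ((PySem.Set.ofList xs).map (fun k => ((xs.count k : Int)) / 2)).sum
        + (List.countP (fun k => decide (xs.count k % 2 = 1)) (PySem.Set.ofList xs) : Int)
        - (List.countP (fun k => decide (xs.count k % 2 = 1)) (PySem.Set.ofList xs) : Int)
      = 2 * ((PySem.Set.ofList xs).map (fun k => ((xs.count k : Int)) / 2)).sum := by ring
  rw [this]
  exact (Int.mul_ediv_cancel_left _ (by norm_num : (2:Int) ≠ 0)).symm

-- ===== VERDICT (by name: the statement is the Claim_ definition above) =====
theorem solution_spec : Claim_equal_solution := by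
  intro S _
  show solution S = solution_alt S
  exact solution_eq_alt S
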